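-- pv_equiv track=rewrite | github.com/apostolovbg/devcovenant | devcovenant/core/metadata_normalizer.py | _parse_metadata_block
-- ===== SOURCE A (Python) =====
-- from typing import Dict, Iterable, List, Sequence, Tuple
--
-- def _parse_metadata_block(
--     block: str,
-- ) -> Tuple[List[str], Dict[str, List[str]]]:
--     """Return ordered keys and per-key line values from a policy-def block."""
--     order: List[str] = []
--     values: Dict[str, List[str]] = {}
--     current_key = ""
--     for line in block.splitlines():
--         stripped = line.strip()
--         if not stripped:
--             continue
--         if ":" in stripped:
--             key, raw_value = stripped.split(":", 1)
--             key = key.strip()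
--             value_text = raw_value.strip()
--             order.append(key)
--             values[key] = [] if not value_text else [value_text]
--             current_key = key
--             continue
--         if current_key:
--             values[current_key].append(stripped)
--     return order, values
-- ===== SOURCE B (Python) =====
-- def _parse_metadata_block(block):
--     """Group the non-blank stripped lines into per-key segments, then emit order and values."""
--     lines = [s for s in (raw.strip() for raw in block.splitlines()) if s]
--     segments = _segments(lines)
--     return [key for key, _ in segments], dict(segments)
--
--
-- def _segments(lines):
--     """One (key, values) segment per colon line; colon-free lines continue the segment."""
--     if not lines:
--         return []
--     head, tail = lines[0], lines[1:]
--     if ":" not in head: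
--         return _segments(tail)  # line before the first key: discarded
--     n = 0
--     while n < len(tail) and ":" not in tail[n]:
--         n += 1
--     key, first = head.split(":", 1)
--     first = first.strip()
--     return [(key.strip(), ([first] if first else []) + tail[:n])] + _segments(tail[n:])
-- ===== Notes on version B (the rewrite author's own statement) =====
-- stated objective: alternative
-- what changed: Replaces A's single interleaved loop (mutable dict plus a current_key sentinel) by a two-phase decomposition: strip-and-filter the lines, recursively group them into per-key segments (header line plus its colon-free continuation lines), then emit the key order and the dict from the segment list.
-- outside the precondition, e.g. on _parse_metadata_block(':v\nx'): A returns ([''], {'': ['v']}), B returns ([''], {'': ['v', 'x']})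
import Mathlib
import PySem

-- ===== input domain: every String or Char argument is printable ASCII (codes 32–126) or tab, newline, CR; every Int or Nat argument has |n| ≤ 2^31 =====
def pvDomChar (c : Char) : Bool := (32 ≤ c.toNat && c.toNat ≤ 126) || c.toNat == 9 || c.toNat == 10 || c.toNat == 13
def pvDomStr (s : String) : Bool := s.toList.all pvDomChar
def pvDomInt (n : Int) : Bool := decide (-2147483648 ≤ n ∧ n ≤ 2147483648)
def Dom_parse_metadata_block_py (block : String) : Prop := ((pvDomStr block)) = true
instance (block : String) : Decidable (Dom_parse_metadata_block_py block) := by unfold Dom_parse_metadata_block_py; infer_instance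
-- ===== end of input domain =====

-- B replaces A's single interleaved loop (mutable dict + current_key sentinel) by a two-phase
-- decomposition: group the non-blank stripped lines into per-key segments, then emit order/values
-- from the segment list (objective: alternative; same behaviour on Pre_).

-- ===== PORT A =====
-- the body of A's for-loop, on one already-stripped non-blank line; state = (order, values, current_key)
def pvLineStepA (st : List String × PySem.Dict String (List String) × String) (stripped : String) :
    List String × PySem.Dict String (List String) × String :=
  if PySem.Str.isIn ":" stripped then
    match PySem.Str.splitMax? stripped ":" 1 with
    | some (key₀ :: raw_value :: _) =>
      let key := PySem.Str.strip key₀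
      let value_text := PySem.Str.strip raw_value
      (st.1 ++ [key], st.2.1.insert key (if value_text == "" then [] else [value_text]), key)
    | _ => st  -- unreachable: ':' occurs in stripped, so split(":", 1) returns exactly two parts
  else if st.2.2 != "" then
    -- values[current_key].append(stripped); current_key was always inserted before, so the
    -- [] default of modify is never consulted (Python's KeyError path is unreachable)
    (st.1, st.2.1.modify st.2.2 [] (fun v => v ++ [stripped]), st.2.2)
  else st

def parse_metadata_block_py (block : String) : List String × (List (String × List String)) :=
  let fin :=
    (PySem.Str.splitlines block).foldl
      (fun st line =>
        let stripped := PySem.Str.strip line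
        if stripped == "" then st else pvLineStepA st stripped)
      ([], PySem.Dict.empty, "")
  (fin.1, fin.2.1.items)

-- ===== PORT B =====
-- port of Source B's while-loop: number of leading colon-free lines
def pvContLen : List String → Nat
  | [] => 0
  | t :: ts => if PySem.Str.isIn ":" t then 0 else pvContLen ts + 1

-- port of Source B's _segments
def pvSegments : List String → List (String × List String)
  | [] => []
  | head :: tail =>
    if PySem.Str.isIn ":" head then
      match PySem.Str.splitMax? head ":" 1 with
      | some (key₀ :: first₀ :: _) =>
        let first := PySem.Str.strip first₀
        (PySem.Str.strip key₀, (if first == "" then [] else [first]) ++ tail.take (pvContLen tail))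
          :: pvSegments (tail.drop (pvContLen tail))
      | _ => pvSegments (tail.drop (pvContLen tail))  -- unreachable: ':' occurs in head
    else pvSegments tail  -- line before the first key: discarded
termination_by l => l.length
decreasing_by all_goals (simp only [List.length_drop, List.length_cons]; omega)

def parse_metadata_block_py_alt (block : String) : List String × (List (String × List String)) :=
  let lines := ((PySem.Str.splitlines block).map PySem.Str.strip).filter (fun s => s != "")
  let segments := pvSegments lines
  (segments.map (fun p => p.1), (PySem.Dict.ofList segments).items)

-- ===== PRECONDITION & SPEC =====
-- the stripped text before the first ':' of a colon line (used only by Pre_)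
def pvKeyOf (s : String) : String :=
  match PySem.Str.splitMax? s ":" 1 with
  | some (k :: _) => PySem.Str.strip k
  | _ => ""

-- Pre_ excludes blocks where a header line with an empty key (only whitespace before its first
-- colon) is immediately followed by a non-blank continuation line: there A's falsy empty-string
-- current_key sentinel silently drops the continuation while B attaches it to the empty key — both defensible
-- on this degenerate corner (on some such blocks a later empty-key header masks the difference).
def Pre_parse_metadata_block_py (block : String) : Prop :=
  List.IsChain
    (fun a b => (PySem.Str.isIn ":" a = true ∧ pvKeyOf a = "") → PySem.Str.isIn ":" b = true)
    (((PySem.Str.splitlines block).map PySem.Str.strip).filter (fun s => s != ""))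

instance (block : String) : Decidable (Pre_parse_metadata_block_py block) := by
  unfold Pre_parse_metadata_block_py; infer_instance

def pvWitness_parse_metadata_block_py : String := "name: dev\n  alpha\n\nk2:\n beta"

def Spec_parse_metadata_block_py (block : String) (out : List String × (List (String × List String))) : Prop := out = parse_metadata_block_py_alt block
instance (block : String) (out : List String × (List (String × List String))) : Decidable (Spec_parse_metadata_block_py block out) := by unfold Spec_parse_metadata_block_py; infer_instance

-- ===== CLAIM (what is proved, stated in full; the proofs are below) =====
def Claim_equal_parse_metadata_block_py : Prop := ∀ (block : String), Dom_parse_metadata_block_py block → Pre_parse_metadata_block_py block → Spec_parse_metadata_block_py block (parse_metadata_block_py block)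

-- ===== LEMMAS AND PROOFS =====

-- split(":", 1) on a string containing ':' returns exactly two parts
lemma pv_go_zero (sep : List Char) (fuel : Nat) (l cur : List Char) (acc : List (List Char)) :
    PySem.Chars.splitOnMax.go sep fuel 0 l cur acc = acc.reverse ++ [cur.reverse ++ l] := by
  cases fuel with
  | zero => simp [PySem.Chars.splitOnMax.go]
  | succ f => cases l <;> simp [PySem.Chars.splitOnMax.go]

lemma pv_go_one (sep : List Char) (hsep : sep ≠ []) :
    ∀ (fuel : Nat) (l : List Char), l.length < fuel → sep <:+: l →
    ∀ (cur : List Char) (acc : List (List Char)),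
    ∃ k r, PySem.Chars.splitOnMax.go sep fuel 1 l cur acc = acc.reverse ++ [k, r] := by
  intro fuel
  induction fuel with
  | zero => intro l hl; omega
  | succ f ih =>
    intro l hl hinf cur acc
    cases l with
    | nil => simp [List.infix_nil] at hinf; exact absurd hinf hsep
    | cons c rest =>
      by_cases hp : sep.isPrefixOf (c :: rest)
      · refine ⟨cur.reverse, List.drop sep.length (c :: rest), ?_⟩
        simp [PySem.Chars.splitOnMax.go, hp, pv_go_zero]
      · have hinf' : sep <:+: rest := by
          rcases List.infix_cons_iff.mp hinf with h | h
          · exact absurd (List.isPrefixOf_iff_prefix.mpr h) hp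
          · exact h
        obtain ⟨k, r, hkr⟩ := ih rest (by simpa using hl) hinf' (c :: cur) acc
        exact ⟨k, r, by simpa [PySem.Chars.splitOnMax.go, hp] using hkr⟩

lemma pv_split_two (s : String) (h : PySem.Str.isIn ":" s = true) :
    ∃ k r : String, PySem.Str.splitMax? s ":" 1 = some [k, r] := by
  have hinf : (":".toList) <:+: s.toList := by
    rw [PySem.Str.isIn_eq] at h
    exact (PySem.Chars.isIn_iff_infix _ _).mp h
  obtain ⟨k, r, hkr⟩ :=
    pv_go_one (":".toList) (by decide) (s.toList.length + 1) s.toList (by omega) hinf [] []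
  refine ⟨String.ofList k, String.ofList r, ?_⟩
  have h1 : PySem.Chars.splitOnMax s.toList ":".toList 1 = [k, r] := by
    rw [PySem.Chars.splitOnMax]
    simpa using hkr
  have h1' : PySem.Chars.splitOnMax s.toList [':'] 1 = [k, r] := by simpa using h1
  simp [PySem.Str.splitMax?, PySem.Chars.splitMax?, h1']

-- the continuation loop of A appends each line to the freshly inserted key
lemma pv_cont_fold (key : String) (hkey : key ≠ "") :
    ∀ (cont : List String), (∀ c ∈ cont, PySem.Str.isIn ":" c = false) →
    ∀ (o : List String) (d : PySem.Dict String (List String)) (v : List String),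
    cont.foldl pvLineStepA (o, d.insert key v, key) = (o, d.insert key (v ++ cont), key) := by
  intro cont
  induction cont with
  | nil => intro _ o d v; simp
  | cons c cs ih =>
    intro hnc o d v
    have hc : PySem.Chars.isIn [':'] c.toList = false := by
      simpa using hnc c (List.mem_cons_self)
    have hstep : pvLineStepA (o, d.insert key v, key) c = (o, d.insert key (v ++ [c]), key) := by
      simp [pvLineStepA, hc, bne_iff_ne, hkey, PySem.Dict.modify,
        PySem.Dict.getD_insert_self, PySem.Dict.insert_insert_self]
    rw [List.foldl_cons, hstep, ih (fun x hx => hnc x (List.mem_cons_of_mem _ hx))]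
    simp

lemma pv_contLen_take : ∀ (t : List String), ∀ c ∈ t.take (pvContLen t), PySem.Str.isIn ":" c = false := by
  intro t
  induction t with
  | nil => simp
  | cons x ts ih =>
    cases hx0 : PySem.Str.isIn ":" x with
    | true =>
      have hx : PySem.Chars.isIn [':'] x.toList = true := by simpa using hx0
      simp [pvContLen, hx]
    | false =>
      have hx : PySem.Chars.isIn [':'] x.toList = false := by simpa using hx0
      intro c hc
      simp only [pvContLen] at hc
      rw [PySem.Str.isIn_eq] at hc
      simp only [show (":".toList : List Char) = [':'] from rfl, hx, Bool.false_eq_true,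
        if_false, List.take_succ_cons, List.mem_cons] at hc
      rcases hc with rfl | hc
      · exact hx0
      · exact ih c hc

lemma pv_contLen_drop : ∀ (t : List String),
    t.drop (pvContLen t) = [] ∨
    ∃ c cs, t.drop (pvContLen t) = c :: cs ∧ PySem.Str.isIn ":" c = true := by
  intro t
  induction t with
  | nil => simp
  | cons x ts ih =>
    cases hx0 : PySem.Str.isIn ":" x with
    | true =>
      have hx : PySem.Chars.isIn [':'] x.toList = true := by simpa using hx0
      right
      exact ⟨x, ts, by simp [pvContLen, hx], hx0⟩
    | false =>
      have hx : PySem.Chars.isIn [':'] x.toList = false := by simpa using hx0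
      have : pvContLen (x :: ts) = pvContLen ts + 1 := by simp [pvContLen, hx]
      rw [this]
      simpa using ih

lemma pv_contLen_zero (t : List String)
    (h : t = [] ∨ ∃ c cs, t = c :: cs ∧ PySem.Str.isIn ":" c = true) : pvContLen t = 0 := by
  rcases h with rfl | ⟨c, cs, rfl, hc⟩
  · rfl
  · have hc' : PySem.Chars.isIn [':'] c.toList = true := by simpa using hc
    simp [pvContLen, hc']

-- main invariant: from any state whose current_key is "" (or whose remaining lines start at a
-- colon line), A's fold over the filtered stripped lines appends exactly B's segment keys to
-- order and folds B's segments into the dict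
set_option maxHeartbeats 1000000 in
lemma pv_main : ∀ (n : Nat) (ls : List String), ls.length ≤ n →
    List.IsChain (fun a b => (PySem.Str.isIn ":" a = true ∧ pvKeyOf a = "") → PySem.Str.isIn ":" b = true) ls →
    ∀ (o : List String) (d : PySem.Dict String (List String)) (ck : String),
    (ck = "" ∨ ls = [] ∨ ∃ c cs, ls = c :: cs ∧ PySem.Str.isIn ":" c = true) →
    (ls.foldl pvLineStepA (o, d, ck)).1 = o ++ (pvSegments ls).map (fun p => p.1) ∧
    (ls.foldl pvLineStepA (o, d, ck)).2.1 = (pvSegments ls).foldl (fun d p => d.insert p.1 p.2) d := by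
  intro n
  induction n with
  | zero =>
    intro ls hl _ o d ck _
    have : ls = [] := List.eq_nil_of_length_eq_zero (by omega)
    subst this
    simp [pvSegments]
  | succ m ih =>
    intro ls hlen hch o d ck hck
    cases ls with
    | nil => simp [pvSegments]
    | cons s t =>
      cases hs : PySem.Str.isIn ":" s with
      | false =>
        have hck' : ck = "" := by
          rcases hck with h | h | ⟨c, cs, heq, hc⟩
          · exact h
          · exact absurd h (by simp)
          · cases heq; rw [hc] at hs; cases hs
        subst hck'
        have hs' : PySem.Chars.isIn [':'] s.toList = false := by simpa using hs
        have hstep : pvLineStepA (o, d, "") s = (o, d, "") := by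
          simp [pvLineStepA, hs']
        have hseg : pvSegments (s :: t) = pvSegments t := by
          rw [pvSegments]
          simp [hs']
        rw [List.foldl_cons, hstep, hseg]
        exact ih t (by simpa using Nat.lt_succ_iff.mp (by simpa using hlen)) hch.tail o d "" (Or.inl rfl)
      | true =>
        obtain ⟨k, r, hsplit⟩ := pv_split_two s hs
        have hs' : PySem.Chars.isIn [':'] s.toList = true := by simpa using hs
        have hlen' : t.length ≤ m := by simpa using Nat.lt_succ_iff.mp (by simpa using hlen)
        have hstep : pvLineStepA (o, d, ck) s =
            (o ++ [PySem.Str.strip k],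
             d.insert (PySem.Str.strip k)
               (if PySem.Str.strip r = "" then [] else [PySem.Str.strip r]),
             PySem.Str.strip k) := by
          simp [pvLineStepA, hs', hsplit]
        have hkeyOf : pvKeyOf s = PySem.Str.strip k := by
          simp [pvKeyOf, hsplit]
        by_cases hk : PySem.Str.strip k = ""
        · -- empty key: Pre_ forces no continuation line right after
          have hz : pvContLen t = 0 := by
            apply pv_contLen_zero
            cases t with
            | nil => left; rfl
            | cons c cs =>
              right
              exact ⟨c, cs, rfl, (List.isChain_cons_cons.mp hch).1 ⟨hs, by rw [hkeyOf]; exact hk⟩⟩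
          have hseg : pvSegments (s :: t) =
              (PySem.Str.strip k,
               if PySem.Str.strip r = "" then [] else [PySem.Str.strip r]) :: pvSegments t := by
            rw [pvSegments]
            simp [hs', hsplit, hz]
          rw [List.foldl_cons, hstep, hseg]
          obtain ⟨h1, h2⟩ := ih t hlen' hch.tail (o ++ [PySem.Str.strip k])
            (d.insert (PySem.Str.strip k)
              (if PySem.Str.strip r = "" then [] else [PySem.Str.strip r]))
            (PySem.Str.strip k) (Or.inl hk)
          refine ⟨?_, ?_⟩
          · rw [h1]; simp
          · rw [List.foldl_cons]; exact h2
        · -- non-empty key: the continuation lines are appended to the freshly inserted key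
          have hseg : pvSegments (s :: t) =
              (PySem.Str.strip k,
               (if PySem.Str.strip r = "" then [] else [PySem.Str.strip r]) ++
                 t.take (pvContLen t)) :: pvSegments (t.drop (pvContLen t)) := by
            rw [pvSegments]
            simp [hs', hsplit]
          have hsplitlist : t = t.take (pvContLen t) ++ t.drop (pvContLen t) :=
            (List.take_append_drop _ _).symm
          have hfold2 : List.foldl pvLineStepA
              (o ++ [PySem.Str.strip k],
               d.insert (PySem.Str.strip k)
                 (if PySem.Str.strip r = "" then [] else [PySem.Str.strip r]),
               PySem.Str.strip k) t
            = List.foldl pvLineStepA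
              (o ++ [PySem.Str.strip k],
               d.insert (PySem.Str.strip k)
                 ((if PySem.Str.strip r = "" then [] else [PySem.Str.strip r]) ++
                   t.take (pvContLen t)),
               PySem.Str.strip k) (t.drop (pvContLen t)) := by
            conv_lhs => rw [hsplitlist]
            rw [List.foldl_append, pv_cont_fold _ hk _ (pv_contLen_take t)]
          rw [List.foldl_cons, hstep, hseg, hfold2]
          have hchain' : List.IsChain _ (t.drop (pvContLen t)) :=
            hch.suffix ((List.drop_suffix _ _).trans (List.suffix_cons _ _))
          have hlen'' : (t.drop (pvContLen t)).length ≤ m := by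
            simp only [List.length_drop]; omega
          obtain ⟨h1, h2⟩ := ih _ hlen'' hchain' (o ++ [PySem.Str.strip k])
            (d.insert (PySem.Str.strip k)
              ((if PySem.Str.strip r = "" then [] else [PySem.Str.strip r]) ++
                t.take (pvContLen t)))
            (PySem.Str.strip k)
            (by rcases pv_contLen_drop t with h | h
                · exact Or.inr (Or.inl h)
                · exact Or.inr (Or.inr h))
          refine ⟨?_, ?_⟩
          · rw [h1]; simp
          · rw [List.foldl_cons]; exact h2

-- ===== VERDICT (by name: the statement is the Claim_ definition above) =====
theorem parse_metadata_block_py_spec : Claim_equal_parse_metadata_block_py := by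
  intro block _ pre
  unfold Spec_parse_metadata_block_py parse_metadata_block_py parse_metadata_block_py_alt
  have hfold : (PySem.Str.splitlines block).foldl
      (fun st line =>
        let stripped := PySem.Str.strip line
        if stripped == "" then st else pvLineStepA st stripped)
      ([], PySem.Dict.empty, "")
      = (((PySem.Str.splitlines block).map PySem.Str.strip).filter (fun s => s != "")).foldl
          pvLineStepA ([], PySem.Dict.empty, "") := by
    rw [← PySem.List.foldl_if_eq_foldl_filter (p := fun s => s != "") (f := pvLineStepA),
      List.foldl_map]
    apply PySem.List.foldl_congr_mem
    intro acc x _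
    by_cases hx : PySem.Str.strip x = "" <;> simp [hx]
  obtain ⟨h1, h2⟩ := pv_main
    ((((PySem.Str.splitlines block).map PySem.Str.strip).filter (fun s => s != "")).length) _
    le_rfl pre [] PySem.Dict.empty "" (Or.inl rfl)
  simp only [hfold]
  exact Prod.ext (by rw [h1]; simp) (by rw [h2]; rfl)
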